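-- pv_equiv track=rewrite | github.com/CMU-VLSI/dlagen | dlagen/hls/util.py | get_addr_from_loop_list
-- ===== SOURCE A (Python) =====
-- def get_addr_from_loop_list(loops, fixed_bounds=False):
-- 	loops = loops[::-1]
-- 	addr = ''
-- 	if len(loops) == 0:
-- 		return '0'
-- 	for i in range(len(loops)):
-- 		op = loops[i]
-- 		for j in range(i):
-- 			postfix = '' if fixed_bounds else '_P'
-- 			op += f"*{loops[j].upper()}{postfix}"
-- 		addr += op
-- 		if i < len(loops) - 1:
-- 			addr += "+"
-- 	return addr
-- ===== SOURCE B (Python) =====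
-- def get_addr_from_loop_list(loops, fixed_bounds=False):
--     if not loops:
--         return '0'
--     postfix = '' if fixed_bounds else '_P'
--     terms = []
--     suffix = ''
--     for name in reversed(loops):
--         terms.append(name + suffix)
--         suffix += f"*{name.upper()}{postfix}"
--     return '+'.join(terms)
-- ===== Notes on version B (the rewrite author's own statement) =====
-- stated objective: faster
-- what changed: B replaces A's nested loop, which rebuilds every term's '*NAME<postfix>' factor chain from scratch, with a single pass over the reversed list that extends one running suffix string and joins the collected terms with '+'.
import Mathlib
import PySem

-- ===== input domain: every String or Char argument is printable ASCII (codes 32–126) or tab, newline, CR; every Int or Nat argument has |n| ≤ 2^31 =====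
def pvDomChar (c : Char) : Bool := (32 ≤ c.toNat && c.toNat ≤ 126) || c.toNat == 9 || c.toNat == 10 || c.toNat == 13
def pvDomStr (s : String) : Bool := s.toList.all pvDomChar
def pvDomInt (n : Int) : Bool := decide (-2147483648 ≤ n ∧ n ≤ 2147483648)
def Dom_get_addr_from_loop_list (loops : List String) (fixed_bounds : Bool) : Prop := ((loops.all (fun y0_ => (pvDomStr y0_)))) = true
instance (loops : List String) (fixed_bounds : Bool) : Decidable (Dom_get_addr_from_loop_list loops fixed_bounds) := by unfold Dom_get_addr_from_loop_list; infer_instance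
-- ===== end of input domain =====

-- B makes a single pass over the reversed list with a running factor suffix instead of A's inner loop that rebuilds each term's factors from scratch (alternative decomposition).

-- ===== PORT A =====
def get_addr_from_loop_list (loops : List String) (fixed_bounds : Bool) : String :=
  let loops := (PySem.List.slice? loops none none (-1)).getD []   -- loops = loops[::-1]
  if loops.length == 0 then "0"
  else
    (PySem.List.pyRange 0 (loops.length : Int) 1).foldl
      (fun addr i =>
        let op := (PySem.List.pyRange 0 i 1).foldl
          (fun op j =>
            let postfix_ := if fixed_bounds then "" else "_P"
            op ++ ("*" ++ PySem.Str.upper (PySem.List.pyGetD loops j "") ++ postfix_))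
          (PySem.List.pyGetD loops i "")
        let addr := addr ++ op
        if i < (loops.length : Int) - 1 then addr ++ "+" else addr)
      ""

-- ===== PORT B =====
def get_addr_from_loop_list_alt (loops : List String) (fixed_bounds : Bool) : String :=
  if loops.isEmpty then "0"
  else
    let postfix_ := if fixed_bounds then "" else "_P"
    let r := loops.reverse.foldl
      (fun (acc : List String × String) name =>
        (acc.1 ++ [name ++ acc.2], acc.2 ++ ("*" ++ PySem.Str.upper name ++ postfix_)))
      (([] : List String), "")
    PySem.Str.join "+" r.1

-- ===== PRECONDITION & SPEC =====
def Spec_get_addr_from_loop_list (loops : List String) (fixed_bounds : Bool) (out : String) : Prop := out = get_addr_from_loop_list_alt loops fixed_bounds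
instance (loops : List String) (fixed_bounds : Bool) (out : String) : Decidable (Spec_get_addr_from_loop_list loops fixed_bounds out) := by unfold Spec_get_addr_from_loop_list; infer_instance

-- ===== CLAIM (what is proved, stated in full; the proofs are below) =====
def Claim_equal_get_addr_from_loop_list : Prop := ∀ (loops : List String) (fixed_bounds : Bool), Dom_get_addr_from_loop_list loops fixed_bounds → Spec_get_addr_from_loop_list loops fixed_bounds (get_addr_from_loop_list loops fixed_bounds)

-- ===== LEMMAS AND PROOFS =====

/-- `"*" + name.upper() + postfix` — one multiplicative factor. -/
def pvFac (p s : String) : String := "*" ++ PySem.Str.upper s ++ p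

/-- concatenation of a list of strings. -/
def pvCat : List String → String
  | [] => ""
  | s :: rest => s ++ pvCat rest

/-- the list of address terms with a given initial suffix (B's invariant). -/
def pvTerms (p : String) : List String → String → List String
  | [], _ => []
  | x :: xs, suf => (x ++ suf) :: pvTerms p xs (suf ++ pvFac p x)

lemma pvCat_append (a b : List String) : pvCat (a ++ b) = pvCat a ++ pvCat b := by
  induction a with
  | nil => simp [pvCat]
  | cons x xs ih => simp [pvCat, ih, String.append_assoc]

lemma pvEmptyAppend (s : String) : "" ++ s = s := by simp

lemma pvB_fold (p : String) (l : List String) (terms : List String) (suf : String) :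
    l.foldl (fun (acc : List String × String) name =>
      (acc.1 ++ [name ++ acc.2], acc.2 ++ ("*" ++ PySem.Str.upper name ++ p))) (terms, suf)
    = (terms ++ pvTerms p l suf, suf ++ pvCat (l.map (pvFac p))) := by
  induction l generalizing terms suf with
  | nil => simp [pvTerms, pvCat]
  | cons x xs ih =>
    rw [List.foldl_cons, ih]
    simp [pvTerms, pvCat, pvFac, String.append_assoc]

lemma pvFoldCat {α : Type} (L : List α) (g : α → String) (a : String) :
    L.foldl (fun acc i => acc ++ g i) a = a ++ pvCat (L.map g) := by
  induction L generalizing a with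
  | nil => simp [pvCat]
  | cons x xs ih => simp [pvCat, ih, String.append_assoc]

lemma pvInner (l : List String) (p : String) (k : Nat) (hk : k ≤ l.length) (base : String) :
    (PySem.List.pyRange 0 (k : Int) 1).foldl
      (fun op j => op ++ ("*" ++ PySem.Str.upper (PySem.List.pyGetD l j "") ++ p)) base
    = base ++ pvCat ((l.take k).map (pvFac p)) := by
  induction k generalizing base with
  | zero => simp [PySem.List.pyRange_one_eq_nil, pvCat]
  | succ k ih =>
    have hk' : k < l.length := hk
    rw [show ((k + 1 : Nat) : Int) = (k : Int) + 1 by push_cast; ring,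
        PySem.List.pyRange_one_succ_right (by positivity)]
    rw [List.foldl_append]
    rw [ih (le_of_lt hk')]
    simp only [List.foldl_cons, List.foldl_nil]
    rw [PySem.List.pyGetD_natCast]
    have h2 : l.take (k + 1) = l.take k ++ [l[k]] := by
      rw [List.take_add_one, List.getElem?_eq_getElem hk']; rfl
    rw [h2, List.map_append, pvCat_append, List.getD_eq_getElem l "" hk']
    simp [pvCat, pvFac, String.append_assoc]

lemma pvTerms_eq (p : String) (l : List String) (suf : String) :
    pvTerms p l suf = (List.range l.length).map
      (fun k => l.getD k "" ++ (suf ++ pvCat ((l.take k).map (pvFac p)))) := by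
  induction l generalizing suf with
  | nil => simp [pvTerms]
  | cons x xs ih =>
    simp only [pvTerms, List.length_cons, List.range_succ_eq_map, List.map_cons, List.map_map]
    refine List.cons_eq_cons.mpr ⟨?_, ?_⟩
    · simp [pvCat]
    · rw [ih]
      apply List.map_congr_left
      intro k _
      simp [pvCat, String.append_assoc, List.take_succ_cons]

lemma pvJoin_singleton (t : String) : PySem.Str.join "+" [t] = t := by
  rw [← String.toList_inj]
  simp [PySem.Str.toList_join, PySem.Chars.join_singleton]

lemma pvJoin_cons_cons (a b : String) (r : List String) :
    PySem.Str.join "+" (a :: b :: r) = a ++ "+" ++ PySem.Str.join "+" (b :: r) := by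
  rw [← String.toList_inj]
  simp [PySem.Str.toList_join, PySem.Chars.join_cons_cons]

lemma pvJ (ts : List String) (h : ts ≠ []) :
    pvCat ((List.range ts.length).map
      (fun k => ts.getD k "" ++ (if k < ts.length - 1 then "+" else "")))
    = PySem.Str.join "+" ts := by
  induction ts with
  | nil => cases h rfl
  | cons t rest ih =>
    cases rest with
    | nil => simp [pvCat, pvJoin_singleton]
    | cons b r =>
      rw [pvJoin_cons_cons]
      rw [show (t :: b :: r).length = (b :: r).length + 1 from rfl]
      rw [List.range_succ_eq_map, List.map_cons, List.map_map]
      simp only [pvCat, Nat.add_sub_cancel]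
      have h0 : 0 < (b :: r).length := by simp
      rw [if_pos h0]
      have hmap : (List.map ((fun k => (t :: b :: r).getD k "" ++ (if k < (b :: r).length then "+" else "")) ∘ Nat.succ) (List.range (b :: r).length))
          = List.map (fun k => (b :: r).getD k "" ++ (if k < (b :: r).length - 1 then "+" else "")) (List.range (b :: r).length) := by
        apply List.map_congr_left
        intro k _
        simp only [Function.comp_apply, List.getD_cons_succ]
        congr 1
        split_ifs <;> first | rfl | omega
      rw [hmap, ih (by simp)]
      simp [String.append_assoc]

-- ===== VERDICT (by name: the statement is the Claim_ definition above) =====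
theorem get_addr_from_loop_list_spec : Claim_equal_get_addr_from_loop_list := by
  intro loops fb _h
  unfold Spec_get_addr_from_loop_list
  simp only [get_addr_from_loop_list, get_addr_from_loop_list_alt,
    PySem.List.slice?_none_none_neg_one, Option.getD_some]
  by_cases hl : loops = []
  · subst hl; simp
  · have hrev : loops.reverse ≠ [] := by simpa using hl
    have hlen : 0 < loops.reverse.length := List.length_pos_iff.mpr hrev
    set l := loops.reverse with hldef
    set p : String := if fb then "" else "_P" with hp
    set n := l.length with hn
    rw [if_neg (by simp; omega), if_neg (by simp [List.isEmpty_iff, hl])]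
    rw [pvB_fold p l [] ""]
    simp only [List.nil_append]
    set ts := pvTerms p l "" with hts0
    have hts : ts = (List.range n).map
        (fun k => l.getD k "" ++ ("" ++ pvCat ((l.take k).map (pvFac p)))) := by
      rw [hts0, pvTerms_eq, hn]
    have hlts : ts.length = n := by rw [hts]; simp
    have htsne : ts ≠ [] := by
      intro h; rw [h] at hlts; simp at hlts; omega
    rw [PySem.List.foldl_congr_mem
      (g := fun (addr : String) (i : Int) => addr ++
        ((l.getD i.toNat "" ++ pvCat ((l.take i.toNat).map (pvFac p))) ++
          (if i < (n : Int) - 1 then "+" else "")))]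
    · rw [pvFoldCat, ← pvJ ts htsne, pvEmptyAppend, hlts]
      simp only [PySem.List.pyRange_one, Int.sub_zero, Int.toNat_natCast, List.map_map]
      congr 1
      apply List.map_congr_left
      intro k hk
      rw [List.mem_range] at hk
      have h1 : ts.getD k "" = l.getD k "" ++ ("" ++ pvCat ((l.take k).map (pvFac p))) := by
        rw [hts]; exact PySem.List.getD_map_range _ _ _ _ hk
      rw [h1, pvEmptyAppend]
      simp only [Function.comp_apply, zero_add, Int.toNat_natCast]
      congr 1
      split_ifs <;> first | rfl | omega
    · intro addr i hi
      rw [PySem.List.mem_pyRange_one] at hi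
      obtain ⟨hi0, hin⟩ := hi
      have hkn : i.toNat ≤ l.length := by omega
      have hir : (PySem.List.pyRange 0 i 1) = PySem.List.pyRange 0 ((i.toNat : Nat) : Int) 1 := by
        rw [Int.toNat_of_nonneg hi0]
      rw [hir, pvInner l p i.toNat hkn]
      have hget : PySem.List.pyGetD l i "" = l.getD i.toNat "" := by
        rw [show i = ((i.toNat : Nat) : Int) from (Int.toNat_of_nonneg hi0).symm,
          PySem.List.pyGetD_natCast]
        simp
        rw [max_eq_left hi0]
      rw [hget]
      split_ifs <;> simp [String.append_assoc]
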